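-- pv_equiv track=rewrite | github.com/ian-de-marcellus/qivis | backend/qivis/trees/service.py | _compute_sibling_info
-- ===== SOURCE A (Python) =====
-- from collections import defaultdict
--
-- def _compute_sibling_info(
--     node_rows: list[dict],
-- ) -> dict[str, tuple[int, int]]:
--     """Compute (sibling_index, sibling_count) for each node.
--
--     Groups nodes by parent_id, orders by created_at (already guaranteed
--     by the projector query), returns {node_id: (index, count)}.
--     """
--     parent_groups: dict[str | None, list[str]] = defaultdict(list)
--     for row in node_rows:
--         parent_groups[row["parent_id"]].append(row["node_id"])
--
--     result: dict[str, tuple[int, int]] = {}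
--     for children in parent_groups.values():
--         count = len(children)
--         for idx, node_id in enumerate(children):
--             result[node_id] = (idx, count)
--     return result
-- ===== SOURCE B (Python) =====
-- def _compute_sibling_info(
--     node_rows: list[dict],
-- ) -> dict[str, tuple[int, int]]:
--     """Recursive partition: peel off the first parent's sibling group, emit it,
--     and recurse on the remaining rows (no grouping dict, no nested group loop)."""
--     if not node_rows:
--         return {}
--     p = node_rows[0]["parent_id"]
--     sibs = [r["node_id"] for r in node_rows if r["parent_id"] == p]
--     rest = [r for r in node_rows if r["parent_id"] != p]
--     out = {node_id: (idx, len(sibs)) for idx, node_id in enumerate(sibs)}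
--     out.update(_compute_sibling_info(rest))
--     return out
-- ===== Notes on version B (the rewrite author's own statement) =====
-- stated objective: alternative
-- what changed: A builds a parent->children defaultdict and then fills the result with a nested loop over the groups; B never builds per-parent lists: it recursively peels off the first row's whole sibling group with two flat filters and merges the recursive result.
-- outside the precondition, e.g. on _compute_sibling_info([{'node_id': None, 'parent_id': None}]): A returns {None: (0, 1)}, B returns {None: (0, 1)}
import Mathlib
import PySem

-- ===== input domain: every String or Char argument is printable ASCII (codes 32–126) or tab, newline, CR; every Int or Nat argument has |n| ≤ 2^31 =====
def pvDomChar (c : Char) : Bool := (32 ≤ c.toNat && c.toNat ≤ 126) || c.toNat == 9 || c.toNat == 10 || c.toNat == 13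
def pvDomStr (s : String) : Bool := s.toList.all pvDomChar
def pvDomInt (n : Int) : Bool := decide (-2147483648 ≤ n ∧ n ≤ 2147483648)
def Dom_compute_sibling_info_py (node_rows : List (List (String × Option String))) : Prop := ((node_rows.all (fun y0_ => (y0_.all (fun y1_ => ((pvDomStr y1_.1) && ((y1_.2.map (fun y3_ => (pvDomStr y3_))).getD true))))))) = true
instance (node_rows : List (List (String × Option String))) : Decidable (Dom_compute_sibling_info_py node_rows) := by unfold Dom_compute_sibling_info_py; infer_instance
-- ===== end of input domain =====

-- B replaces A's group-by-parent dict and nested group loop by a recursive partition that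
-- peels off the first parent's sibling group and recurses on the remaining rows (objective:
-- alternative decomposition; equality of the returned association lists is proved below).

-- ===== PORT A =====
-- row["parent_id"] / row["node_id"]: first-match association-list lookup; the .getD defaults
-- are only reached outside Pre_ (missing key = KeyError, node_id None not a str key).
def pvRowParent (row : List (String × Option String)) : Option String :=
  (row.lookup "parent_id").getD none

def pvRowNode (row : List (String × Option String)) : String :=
  ((row.lookup "node_id").getD none).getD ""

def compute_sibling_info_py (node_rows : List (List (String × Option String))) : List (String × Int × Int) :=
  let parent_groups : PySem.Dict (Option String) (List String) :=
    node_rows.foldl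
      (fun d row => d.modify (pvRowParent row) [] (fun l => l ++ [pvRowNode row]))
      PySem.Dict.empty
  let result : PySem.Dict String (Int × Int) :=
    parent_groups.values.foldl
      (fun res children =>
        (PySem.List.enumerate children).foldl
          (fun res q => res.insert q.2 (q.1, (children.length : Int))) res)
      PySem.Dict.empty
  result.items

-- ===== PORT B =====
def compute_sibling_info_py_alt : List (List (String × Option String)) → List (String × Int × Int)
  | [] => []
  | r :: rs =>
    let sibs := ((r :: rs).filter (fun x => pvRowParent x == pvRowParent r)).map pvRowNode
    let out0 : PySem.Dict String (Int × Int) :=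
      (PySem.List.enumerate sibs).foldl
        (fun d q => d.insert q.2 (q.1, (sibs.length : Int))) PySem.Dict.empty
    let out :=
      (compute_sibling_info_py_alt ((r :: rs).filter (fun x => pvRowParent x != pvRowParent r))).foldl
        (fun d kv => d.insert kv.1 kv.2) out0
    out.items
termination_by l => l.length
decreasing_by
  simp only [List.filter_cons, bne_self_eq_false, List.length_cons]
  exact Nat.lt_succ_of_le (List.length_filter_le _ _)

-- ===== PRECONDITION & SPEC =====
-- Pre_ excludes exactly the rows on which A raises KeyError (a missing "parent_id"/"node_id"
-- key) and the rows whose "node_id" value is None, on which A returns a dict with a None key,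
-- not a value of the declared type dict[str, tuple[int, int]].
def Pre_compute_sibling_info_py (node_rows : List (List (String × Option String))) : Prop :=
  ∀ row ∈ node_rows,
    (row.lookup "parent_id").isSome = true ∧ (Option.join (row.lookup "node_id")).isSome = true

instance (node_rows : List (List (String × Option String))) : Decidable (Pre_compute_sibling_info_py node_rows) := by
  unfold Pre_compute_sibling_info_py; infer_instance

def pvWitness_compute_sibling_info_py : (List (List (String × Option String))) :=
  [[("node_id", some "a"), ("parent_id", none)],
   [("node_id", some "b"), ("parent_id", some "a")]]

def Spec_compute_sibling_info_py (node_rows : List (List (String × Option String))) (out : List (String × Int × Int)) : Prop := out = compute_sibling_info_py_alt node_rows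
instance (node_rows : List (List (String × Option String))) (out : List (String × Int × Int)) : Decidable (Spec_compute_sibling_info_py node_rows out) := by unfold Spec_compute_sibling_info_py; infer_instance

-- ===== CLAIM (what is proved, stated in full; the proofs are below) =====
def Claim_equal_compute_sibling_info_py : Prop := ∀ (node_rows : List (List (String × Option String))), Dom_compute_sibling_info_py node_rows → Pre_compute_sibling_info_py node_rows → Spec_compute_sibling_info_py node_rows (compute_sibling_info_py node_rows)

-- ===== LEMMAS AND PROOFS =====

-- Both sides reduce to folding `insert` over one canonical sequence of (node_id, (idx, count))
-- triples, grouped by parent in first-appearance order (pvSeq below).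

def pvIns (d : PySem.Dict String (Int × Int)) (kv : String × Int × Int) : PySem.Dict String (Int × Int) :=
  d.insert kv.1 kv.2

def pvF (d : PySem.Dict String (Int × Int)) (l : List (String × Int × Int)) : PySem.Dict String (Int × Int) :=
  l.foldl pvIns d

def pvChild (ns : List String) : List (String × Int × Int) :=
  (PySem.List.enumerate ns).map (fun q => (q.2, (q.1, (ns.length : Int))))

def pvSeq : List (List (String × Option String)) → List (String × Int × Int)
  | [] => []
  | r :: rs =>
    pvChild (((r :: rs).filter (fun x => pvRowParent x == pvRowParent r)).map pvRowNode) ++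
      pvSeq ((r :: rs).filter (fun x => pvRowParent x != pvRowParent r))
termination_by l => l.length
decreasing_by
  simp only [List.filter_cons, bne_self_eq_false, List.length_cons]
  exact Nat.lt_succ_of_le (List.length_filter_le _ _)


-- helper: the grouping loop of A, over an arbitrary starting dict
def pvG (d : PySem.Dict (Option String) (List String)) (rows : List (List (String × Option String))) :
    PySem.Dict (Option String) (List String) :=
  rows.foldl (fun d row => d.modify (pvRowParent row) [] (fun l => l ++ [pvRowNode row])) d

theorem pv_map_replace_id {κ ν : Type} [BEq κ] [LawfulBEq κ] (l : List (κ × ν)) (k : κ) (v : ν)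
    (h : ∀ p ∈ l, p.1 ≠ k) :
    l.map (fun p => if (p.1 == k) = true then (k, v) else p) = l := by
  induction l with
  | nil => rfl
  | cons a t ih =>
    rw [List.map_cons, if_neg (by simpa using h a (by simp)),
        ih (fun p hp => h p (by simp [hp]))]

theorem pv_modify_mk_cons_ne {κ ν : Type} [BEq κ] [LawfulBEq κ] (p q : κ) (xs : ν)
    (l : List (κ × ν)) (d0 : ν) (f : ν → ν) (hne : q ≠ p) :
    (PySem.Dict.mk ((p, xs) :: l)).modify q d0 f
      = PySem.Dict.mk ((p, xs) :: ((PySem.Dict.mk l).modify q d0 f).items) := by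
  have hpq : (p == q) = false := by simpa using (Ne.symm hne)
  have hget : (PySem.Dict.mk ((p, xs) :: l)).getD q d0 = (PySem.Dict.mk l).getD q d0 := by
    simp [PySem.Dict.getD, PySem.Dict.get?_mk_cons, hpq]
  rw [PySem.Dict.modify, PySem.Dict.modify, hget]
  cases hc : (PySem.Dict.mk l).contains q with
  | true =>
    have hc' : (PySem.Dict.mk ((p, xs) :: l)).contains q = true := by
      simp only [PySem.Dict.contains, List.any_cons] at hc ⊢
      simp [hc]
    apply PySem.Dict.ext
    rw [PySem.Dict.items_insert_of_contains _ _ hc']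
    show _ = (p, xs) :: (PySem.Dict.insert _ _ _).items
    rw [PySem.Dict.items_insert_of_contains _ _ hc]
    simp [hpq]
  | false =>
    have hc' : (PySem.Dict.mk ((p, xs) :: l)).contains q = false := by
      simp only [PySem.Dict.contains, List.any_cons] at hc ⊢
      simp [hc, hpq]
    apply PySem.Dict.ext
    rw [PySem.Dict.items_insert_of_not_contains _ _ hc']
    show _ = (p, xs) :: (PySem.Dict.insert _ _ _).items
    rw [PySem.Dict.items_insert_of_not_contains _ _ hc]
    rfl

theorem pv_modify_mk_cons_self {κ ν : Type} [BEq κ] [LawfulBEq κ] (p : κ) (xs : ν)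
    (l : List (κ × ν)) (d0 : ν) (f : ν → ν) (hp : ∀ e ∈ l, e.1 ≠ p) :
    (PySem.Dict.mk ((p, xs) :: l)).modify p d0 f = PySem.Dict.mk ((p, f xs) :: l) := by
  have hget : (PySem.Dict.mk ((p, xs) :: l)).getD p d0 = xs := by
    simp [PySem.Dict.getD, PySem.Dict.get?_mk_cons]
  have hc : (PySem.Dict.mk ((p, xs) :: l)).contains p = true := by
    simp [PySem.Dict.contains]
  rw [PySem.Dict.modify, hget]
  apply PySem.Dict.ext
  rw [PySem.Dict.items_insert_of_contains _ _ hc]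
  show _ = (p, f xs) :: l
  rw [List.map_cons, if_pos (by simp)]
  rw [pv_map_replace_id l p (f xs) hp]

theorem pv_insert_comm_of_contains (d : PySem.Dict String (Int × Int)) (k b : String)
    (v u : Int × Int) (hk : d.contains k = true) (hne : k ≠ b) :
    (d.insert b u).insert k v = (d.insert k v).insert b u := by
  have hkk : (d.insert b u).contains k = true := by
    rw [PySem.Dict.contains_insert]; simp [hk]
  have hbk : (d.insert k v).contains b = d.contains b := by
    rw [PySem.Dict.contains_insert]; simp [Ne.symm hne]
  apply PySem.Dict.ext
  by_cases hb : d.contains b = true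
  · rw [PySem.Dict.items_insert_of_contains _ _ hkk,
        PySem.Dict.items_insert_of_contains _ _ hb,
        PySem.Dict.items_insert_of_contains _ _ (by rw [hbk]; exact hb),
        PySem.Dict.items_insert_of_contains _ _ hk]
    simp only [List.map_map]
    apply List.map_congr_left
    intro p _
    by_cases h1 : p.1 = b <;> by_cases h2 : p.1 = k <;>
      simp_all [Function.comp, Ne.symm hne]
  · have hb' : d.contains b = false := by simpa using hb
    rw [PySem.Dict.items_insert_of_contains _ _ hkk,
        PySem.Dict.items_insert_of_not_contains _ _ hb',
        PySem.Dict.items_insert_of_not_contains _ _ (by rw [hbk]; exact hb'),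
        PySem.Dict.items_insert_of_contains _ _ hk]
    simp [Ne.symm hne]

theorem pv_insert_foldl_comm (t : List (String × Int × Int)) (d : PySem.Dict String (Int × Int))
    (k : String) (v : Int × Int) (hk : d.contains k = true) (ht : ∀ p ∈ t, p.1 ≠ k) :
    (pvF d t).insert k v = pvF (d.insert k v) t := by
  induction t generalizing d with
  | nil => rfl
  | cons b t' ih =>
    have hbk : b.1 ≠ k := ht b (by simp)
    have h1 : (d.insert b.1 b.2).contains k = true := by
      rw [PySem.Dict.contains_insert]; simp [hk]
    calc (pvF (d.insert b.1 b.2) t').insert k v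
        = pvF ((d.insert b.1 b.2).insert k v) t' := ih _ h1 (fun p hp => ht p (by simp [hp]))
      _ = pvF ((d.insert k v).insert b.1 b.2) t' := by
          rw [pv_insert_comm_of_contains _ _ _ _ _ hk (Ne.symm hbk)]

theorem pv_merge_insert_contains (l : List (String × Int × Int)) (k : String) (v : Int × Int)
    (hnd : (l.map Prod.fst).Nodup) (hc : (PySem.Dict.mk l).contains k = true) :
    ∀ d, pvF d (l.map (fun p => if (p.1 == k) = true then (k, v) else p)) = (pvF d l).insert k v := by
  induction l with
  | nil => simp [PySem.Dict.contains] at hc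
  | cons a t ih =>
    intro d
    rw [List.map_cons] at hnd
    obtain ⟨hna, hnt'⟩ := List.nodup_cons.mp hnd
    by_cases hak : a.1 = k
    · have hnt : ∀ p ∈ t, p.1 ≠ k := by
        intro p hp hpk
        exact hna (by rw [hak, ← hpk]; exact List.mem_map_of_mem hp)
      rw [List.map_cons, if_pos (by simpa using hak)]
      rw [pv_map_replace_id t k v hnt]
      show pvF (d.insert k v) t = (pvF (d.insert a.1 a.2) t).insert k v
      rw [pv_insert_foldl_comm t (d.insert a.1 a.2) k v
            (by rw [PySem.Dict.contains_insert]; simp [hak]) hnt]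
      rw [hak, PySem.Dict.insert_insert_self]
    · have hct : (PySem.Dict.mk t).contains k = true := by
        have hne : (a.1 == k) = false := by simpa using hak
        simpa [PySem.Dict.contains, hne] using hc
      rw [List.map_cons, if_neg (by simpa using hak)]
      show pvF (d.insert a.1 a.2) (t.map _) = (pvF (d.insert a.1 a.2) t).insert k v
      exact ih hnt' hct _

theorem pv_merge_insert (l : List (String × Int × Int)) (d : PySem.Dict String (Int × Int))
    (k : String) (v : Int × Int) (hnd : (l.map Prod.fst).Nodup) :
    pvF d ((PySem.Dict.insert (PySem.Dict.mk l) k v).items) = (pvF d l).insert k v := by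
  cases hc : (PySem.Dict.mk l).contains k with
  | true =>
    rw [PySem.Dict.items_insert_of_contains _ _ hc]
    exact pv_merge_insert_contains l k v hnd hc d
  | false =>
    rw [PySem.Dict.items_insert_of_not_contains _ _ hc]
    show pvF d (l ++ [(k, v)]) = _
    rw [pvF, List.foldl_append]
    rfl

theorem pv_replay (s : List (String × Int × Int)) (d : PySem.Dict String (Int × Int)) :
    pvF d ((pvF PySem.Dict.empty s).items) = pvF d s := by
  induction s using List.reverseRecOn generalizing d with
  | nil => rfl
  | append_singleton s kv ih =>
    have hnd : (((pvF PySem.Dict.empty s).items).map Prod.fst).Nodup := by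
      have := PySem.Dict.nodup_keys_foldl_insert_key s (fun kv => kv.1)
        (fun _ kv => kv.2) PySem.Dict.empty (by simp [PySem.Dict.keys, PySem.Dict.empty])
      simpa [PySem.Dict.keys, pvF, pvIns] using this
    have h1 : pvF PySem.Dict.empty (s ++ [kv]) = (pvF PySem.Dict.empty s).insert kv.1 kv.2 := by
      rw [pvF, List.foldl_append]; rfl
    have h2 := pv_merge_insert ((pvF PySem.Dict.empty s).items) d kv.1 kv.2 hnd
    rw [ih] at h2
    rw [h1, show pvF d (s ++ [kv]) = (pvF d s).insert kv.1 kv.2 from by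
      rw [pvF, List.foldl_append]; rfl]
    exact h2


theorem pv_group (rows : List (List (String × Option String))) :
    ∀ (p : Option String) (xs : List String) (l : List ((Option String) × List String)),
      p ∉ l.map Prod.fst → (l.map Prod.fst).Nodup →
      pvG (PySem.Dict.mk ((p, xs) :: l)) rows
        = PySem.Dict.mk ((p, xs ++ (rows.filter (fun x => pvRowParent x == p)).map pvRowNode)
            :: (pvG (PySem.Dict.mk l) (rows.filter (fun x => pvRowParent x != p))).items) := by
  induction rows with
  | nil => intro p xs l _ _; simp [pvG]
  | cons r rows' ih =>
    intro p xs l hp hnd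
    by_cases hq : pvRowParent r = p
    · have step : pvG (PySem.Dict.mk ((p, xs) :: l)) (r :: rows')
          = pvG (PySem.Dict.mk ((p, xs ++ [pvRowNode r]) :: l)) rows' := by
        rw [pvG, List.foldl_cons, hq, pv_modify_mk_cons_self p xs l [] _
              (fun e he hep => hp (hep ▸ List.mem_map_of_mem he)), ← pvG]
      have hf1 : (r :: rows').filter (fun x => pvRowParent x == p)
          = r :: rows'.filter (fun x => pvRowParent x == p) := by
        simp [hq]
      have hf2 : (r :: rows').filter (fun x => pvRowParent x != p)
          = rows'.filter (fun x => pvRowParent x != p) := by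
        simp [hq]
      rw [hf1, hf2, step, ih p (xs ++ [pvRowNode r]) l hp hnd]
      simp only [List.map_cons, List.append_assoc, List.singleton_append]
    · have hqb : (pvRowParent r == p) = false := by simpa using hq
      have step : pvG (PySem.Dict.mk ((p, xs) :: l)) (r :: rows')
          = pvG (PySem.Dict.mk ((p, xs) ::
              ((PySem.Dict.mk l).modify (pvRowParent r) [] (fun cl => cl ++ [pvRowNode r])).items)) rows' := by
        rw [pvG, List.foldl_cons, pv_modify_mk_cons_ne p (pvRowParent r) xs l [] _ hq, ← pvG]
      set d' := (PySem.Dict.mk l).modify (pvRowParent r) [] (fun cl => cl ++ [pvRowNode r]) with hd'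
      have hp' : p ∉ d'.items.map Prod.fst := by
        show p ∉ d'.keys
        intro hmem
        rw [hd', PySem.Dict.modify] at hmem
        rcases (PySem.Dict.mem_keys_insert _ _ _ _).mp hmem with h | h
        · exact hq (h.symm)
        · exact hp (by simpa [PySem.Dict.keys] using h)
      have hnd' : (d'.items.map Prod.fst).Nodup := by
        show d'.keys.Nodup
        rw [hd', PySem.Dict.modify]
        exact PySem.Dict.nodup_keys_insert _ _ _ (by simpa [PySem.Dict.keys] using hnd)
      have hf1 : (r :: rows').filter (fun x => pvRowParent x == p)
          = rows'.filter (fun x => pvRowParent x == p) := by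
        simp [hqb]
      have hf2 : (r :: rows').filter (fun x => pvRowParent x != p)
          = r :: rows'.filter (fun x => pvRowParent x != p) := by
        simp [bne, hqb]
      rw [hf1, hf2, step]
      have hstep2 : pvG (PySem.Dict.mk l) (r :: rows'.filter (fun x => pvRowParent x != p))
          = pvG d' (rows'.filter (fun x => pvRowParent x != p)) := by
        rw [pvG, List.foldl_cons, ← pvG, hd']
      rw [hstep2]
      exact ih p xs d'.items hp' hnd'

theorem pv_group_vals (r : List (String × Option String)) (rs : List (List (String × Option String))) :
    pvG PySem.Dict.empty (r :: rs)
      = PySem.Dict.mk ((pvRowParent r,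
            ((r :: rs).filter (fun x => pvRowParent x == pvRowParent r)).map pvRowNode)
          :: (pvG PySem.Dict.empty ((r :: rs).filter (fun x => pvRowParent x != pvRowParent r))).items) := by
  have hmod : (PySem.Dict.empty : PySem.Dict (Option String) (List String)).modify
      (pvRowParent r) [] (fun l => l ++ [pvRowNode r])
      = PySem.Dict.mk [(pvRowParent r, [pvRowNode r])] := by
    apply PySem.Dict.ext
    rw [PySem.Dict.modify, PySem.Dict.items_insert_of_not_contains _ _ (by rfl)]
    rfl
  have h0 : pvG PySem.Dict.empty (r :: rs) = pvG (PySem.Dict.mk [(pvRowParent r, [pvRowNode r])]) rs := by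
    rw [pvG, List.foldl_cons, ← pvG, hmod]
  have h1 := pv_group rs (pvRowParent r) [pvRowNode r] [] (by simp) (by simp)
  have hf1 : (r :: rs).filter (fun x => pvRowParent x == pvRowParent r)
      = r :: rs.filter (fun x => pvRowParent x == pvRowParent r) := by
    simp
  have hf2 : (r :: rs).filter (fun x => pvRowParent x != pvRowParent r)
      = rs.filter (fun x => pvRowParent x != pvRowParent r) := by
    simp
  rw [h0, h1, hf1, hf2]
  simp only [List.map_cons, List.singleton_append]
  rfl

theorem pv_res (rows : List (List (String × Option String))) :
    ∀ res : PySem.Dict String (Int × Int),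
      ((pvG PySem.Dict.empty rows).values).foldl
        (fun res children =>
          (PySem.List.enumerate children).foldl
            (fun res q => res.insert q.2 (q.1, (children.length : Int))) res) res
      = pvF res (pvSeq rows) := by
  induction rows using pvSeq.induct with
  | case1 => intro res; rw [pvSeq]; rfl
  | case2 r rs ih =>
    intro res
    rw [pv_group_vals r rs]
    simp only [PySem.Dict.values, List.map_cons, List.foldl_cons]
    rw [show pvSeq (r :: rs)
          = pvChild (((r :: rs).filter (fun x => pvRowParent x == pvRowParent r)).map pvRowNode)
            ++ pvSeq ((r :: rs).filter (fun x => pvRowParent x != pvRowParent r)) from by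
        rw [pvSeq]]
    rw [pvF, List.foldl_append, ← pvF, ← pvF]
    rw [show pvF res (pvChild (((r :: rs).filter (fun x => pvRowParent x == pvRowParent r)).map pvRowNode))
          = (PySem.List.enumerate (((r :: rs).filter (fun x => pvRowParent x == pvRowParent r)).map pvRowNode)).foldl
              (fun res q => res.insert q.2
                (q.1, ((((r :: rs).filter (fun x => pvRowParent x == pvRowParent r)).map pvRowNode).length : Int))) res from by
        rw [pvF, pvChild, List.foldl_map]; rfl]
    exact ih _
  
theorem pv_a_eq (rows : List (List (String × Option String))) :
    compute_sibling_info_py rows = (pvF PySem.Dict.empty (pvSeq rows)).items := by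
  rw [compute_sibling_info_py]
  rw [show (rows.foldl
        (fun d row => d.modify (pvRowParent row) [] (fun l => l ++ [pvRowNode row]))
        PySem.Dict.empty) = pvG PySem.Dict.empty rows from rfl]
  rw [pv_res rows PySem.Dict.empty]

theorem pv_alt_eq (rows : List (List (String × Option String))) :
    compute_sibling_info_py_alt rows = (pvF PySem.Dict.empty (pvSeq rows)).items := by
  induction rows using compute_sibling_info_py_alt.induct with
  | case1 => rw [compute_sibling_info_py_alt, pvSeq]; rfl
  | case2 r rs ih =>
    simp only [compute_sibling_info_py_alt]
    rw [ih]
    rw [show ((PySem.List.enumerate (((r :: rs).filter (fun x => pvRowParent x == pvRowParent r)).map pvRowNode)).foldl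
          (fun d q => d.insert q.2
            (q.1, ((((r :: rs).filter (fun x => pvRowParent x == pvRowParent r)).map pvRowNode).length : Int)))
          PySem.Dict.empty)
        = pvF PySem.Dict.empty (pvChild (((r :: rs).filter (fun x => pvRowParent x == pvRowParent r)).map pvRowNode)) from by
      rw [pvF, pvChild, List.foldl_map]; rfl]
    rw [show ∀ X : PySem.Dict String (Int × Int),
          ((pvF PySem.Dict.empty (pvSeq ((r :: rs).filter (fun x => pvRowParent x != pvRowParent r)))).items).foldl
            (fun d kv => d.insert kv.1 kv.2) X
          = pvF X ((pvF PySem.Dict.empty (pvSeq ((r :: rs).filter (fun x => pvRowParent x != pvRowParent r)))).items) from fun X => rfl]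
    rw [pv_replay]
    rw [show pvSeq (r :: rs)
          = pvChild (((r :: rs).filter (fun x => pvRowParent x == pvRowParent r)).map pvRowNode)
            ++ pvSeq ((r :: rs).filter (fun x => pvRowParent x != pvRowParent r)) from by rw [pvSeq]]
    conv_rhs => rw [pvF, List.foldl_append]
    rfl

-- ===== VERDICT (by name: the statement is the Claim_ definition above) =====
theorem compute_sibling_info_py_spec : Claim_equal_compute_sibling_info_py := by
  intro node_rows _ _
  unfold Spec_compute_sibling_info_py
  rw [pv_a_eq, pv_alt_eq]
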